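-- pv_equiv track=rewrite | github.com/mayrstefan/checkmk-extensions | pgbouncer/src/agent_based/pgbouncer_pools.py | parse_pgbouncer_pools
-- ===== SOURCE A (Python) =====
-- def parse_pgbouncer_pools(string_table):
--     pools = {}
--     instance_name = ""
--     instance_linecount = 0
--     instance_columns = []
--     for line in string_table:
--         if line[0].startswith("[[[") and line[0].endswith("]]]"):
--             instance_name = line[0][3:-3]
--             instance_linecount = 0
--             continue
--         instance_linecount += 1
--         # First line has column names
--         if instance_linecount == 1:
--             instance_columns = line
--             continue
--         # regular line represents a pool
--         pool = {}
--         for i in range(0, len(instance_columns)):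
--             pool[instance_columns[i]] = line[i]
--         pool_name = "%s/%s/%s" % (instance_name, pool["database"], pool["user"])
--         pools[pool_name] = pool
--     return pools
-- ===== SOURCE B (Python) =====
-- def parse_pgbouncer_pools(string_table):
--     # First pass: partition the rows into (instance_name, body) segments at the
--     # "[[[name]]]" header rows; rows before the first header form an ''-named segment.
--     segments = []
--     name, body = "", []
--     for line in string_table:
--         if line[0].startswith("[[[") and line[0].endswith("]]]"):
--             segments.append((name, body))
--             name, body = line[0][3:-3], []
--         else:
--             body.append(line)
--     segments.append((name, body))
--     # Second pass: first row of a segment names the columns, the rest are pools.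
--     pools = {}
--     for name, body in segments:
--         if not body:
--             continue
--         columns = body[0]
--         for row in body[1:]:
--             pool = dict(zip(columns, row))
--             pools["%s/%s/%s" % (name, pool["database"], pool["user"])] = pool
--     return pools
-- ===== Notes on version B (the rewrite author's own statement) =====
-- stated objective: alternative
-- what changed: A's single stateful loop (instance name, line counter, current columns carried across rows) is re-decomposed into two passes: first partition the rows into (instance_name, body) segments at the '[[[...]]]' headers, then build each segment's pools by zipping its first row (the column names) with each remaining row, replacing A's index loop over range(len(columns)).
import Mathlib
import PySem

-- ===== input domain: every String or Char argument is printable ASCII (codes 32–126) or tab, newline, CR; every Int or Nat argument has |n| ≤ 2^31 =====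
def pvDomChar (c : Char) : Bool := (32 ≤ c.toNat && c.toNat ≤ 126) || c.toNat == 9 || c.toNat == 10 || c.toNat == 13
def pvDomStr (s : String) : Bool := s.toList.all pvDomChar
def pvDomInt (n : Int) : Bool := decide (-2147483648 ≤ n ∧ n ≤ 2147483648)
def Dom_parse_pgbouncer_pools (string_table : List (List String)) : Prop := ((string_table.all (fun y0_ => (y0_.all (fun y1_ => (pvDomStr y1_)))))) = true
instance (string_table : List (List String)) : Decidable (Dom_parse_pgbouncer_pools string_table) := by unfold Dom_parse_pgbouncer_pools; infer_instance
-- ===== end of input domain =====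

-- B re-decomposes A's single stateful loop into two passes (split the rows into
-- (instance, body) segments, then build each segment's pools by zipping the header
-- columns with each row); objective: alternative decomposition, same cost.

-- ===== PORT A =====
-- shared literal helpers (both Pythons test/strip the header cell the same way)
def pvFirst (line : List String) : String := PySem.List.pyGetD line 0 ""  -- line[0]; Pre_ excludes empty rows (IndexError)
def pvIsHeader (s : String) : Bool := PySem.Str.startswith s "[[[" && PySem.Str.endswith s "]]]"
def pvStrip (s : String) : String := PySem.Str.slice s (some 3) (some (-3))  -- s[3:-3]

def pvStepA (st : PySem.Dict String (PySem.Dict String String) × String × Int × List String)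
    (line : List String) : PySem.Dict String (PySem.Dict String String) × String × Int × List String :=
  let pools := st.1
  let name := st.2.1
  let cnt := st.2.2.1
  let cols := st.2.2.2
  let first := pvFirst line
  if pvIsHeader first then (pools, pvStrip first, 0, cols)
  else
    let cnt := cnt + 1
    if cnt = 1 then (pools, name, cnt, line)
    else
      -- pool[instance_columns[i]] = line[i] for i in range(0, len(instance_columns));
      -- Pre_ excludes rows shorter than the columns row (IndexError)
      let pool := (PySem.List.pyRange 0 (cols.length : Int) 1).foldl
        (fun p i => p.insert (PySem.List.pyGetD cols i "") (PySem.List.pyGetD line i "")) PySem.Dict.empty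
      -- pool["database"] / pool["user"]; Pre_ guarantees the keys exist (KeyError otherwise)
      let key := name ++ "/" ++ pool.getD "database" "" ++ "/" ++ pool.getD "user" ""
      (pools.insert key pool, name, cnt, cols)

def parse_pgbouncer_pools (string_table : List (List String)) : List (String × List (String × String)) :=
  ((string_table.foldl pvStepA (PySem.Dict.empty, "", 0, [])).1.items).map (fun p => (p.1, p.2.items))

-- ===== PORT B =====
-- pass 1: partition the rows into (instance_name, body) segments at the "[[[...]]]" headers
def pvSeg1 (st : List (String × List (List String)) × String × List (List String))
    (line : List String) : List (String × List (List String)) × String × List (List String) :=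
  let segs := st.1
  let name := st.2.1
  let body := st.2.2
  let first := pvFirst line
  if pvIsHeader first then (segs ++ [(name, body)], pvStrip first, [])
  else (segs, name, body ++ [line])

-- pools[...] = dict(zip(columns, row)) keyed "%s/%s/%s" % (name, pool["database"], pool["user"])
def pvRowStep (name : String) (cols : List String)
    (pools : PySem.Dict String (PySem.Dict String String)) (row : List String) :
    PySem.Dict String (PySem.Dict String String) :=
  let pool := PySem.Dict.ofList (cols.zip row)
  pools.insert (name ++ "/" ++ pool.getD "database" "" ++ "/" ++ pool.getD "user" "") pool

-- pass 2: a segment's first row names the columns, the remaining rows are pools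
def pvSegStep (pools : PySem.Dict String (PySem.Dict String String))
    (seg : String × List (List String)) : PySem.Dict String (PySem.Dict String String) :=
  match seg.2 with
  | [] => pools
  | cols :: rows => rows.foldl (pvRowStep seg.1 cols) pools

def parse_pgbouncer_pools_alt (string_table : List (List String)) : List (String × List (String × String)) :=
  let s := string_table.foldl pvSeg1 ([], "", [])
  let segments := s.1 ++ [(s.2.1, s.2.2)]
  ((segments.foldl pvSegStep PySem.Dict.empty).items).map (fun p => (p.1, p.2.items))

-- ===== PRECONDITION & SPEC =====
-- Shape check over the sectioned rows (copt = the current segment's columns row, none while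
-- awaiting one): every row is nonempty (A's line[0] is IndexError on []), every pool row is at
-- least as long as its columns row (IndexError), and its columns contain "database" and "user"
-- (KeyError).  Exactly the inputs on which Python A returns normally.
def pvPreAux : Option (List String) → List (List String) → Bool
  | _, [] => true
  | copt, line :: rest =>
    match line with
    | [] => false
    | first :: _ =>
      if pvIsHeader first then pvPreAux none rest
      else
        match copt with
        | none => pvPreAux (some line) rest
        | some cols =>
          decide (cols.length ≤ line.length) && cols.contains "database" && cols.contains "user"
            && pvPreAux copt rest

def Pre_parse_pgbouncer_pools (string_table : List (List String)) : Prop :=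
  pvPreAux none string_table = true
instance (string_table : List (List String)) : Decidable (Pre_parse_pgbouncer_pools string_table) := by
  unfold Pre_parse_pgbouncer_pools; infer_instance

def pvWitness_parse_pgbouncer_pools : List (List String) :=
  [["[[[pgbouncer]]]"], ["database", "user", "cl_active"], ["db1", "u1", "3"], ["db2", "u2", "0"]]

def Spec_parse_pgbouncer_pools (string_table : List (List String)) (out : List (String × List (String × String))) : Prop := out = parse_pgbouncer_pools_alt string_table
instance (string_table : List (List String)) (out : List (String × List (String × String))) : Decidable (Spec_parse_pgbouncer_pools string_table out) := by unfold Spec_parse_pgbouncer_pools; infer_instance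

-- ===== CLAIM (what is proved, stated in full; the proofs are below) =====
def Claim_equal_parse_pgbouncer_pools : Prop := ∀ (string_table : List (List String)), Dom_parse_pgbouncer_pools string_table → Pre_parse_pgbouncer_pools string_table → Spec_parse_pgbouncer_pools string_table (parse_pgbouncer_pools string_table)

-- ===== LEMMAS AND PROOFS =====

-- reference recursion: process the remaining rows given the current instance name and
-- (optionally) the current segment's columns row; both ports are folded into this shape.
def pvRefA : PySem.Dict String (PySem.Dict String String) → String → Option (List String) →
    List (List String) → PySem.Dict String (PySem.Dict String String)
  | pools, _, _, [] => pools
  | pools, name, copt, line :: rest =>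
    if pvIsHeader (pvFirst line) then pvRefA pools (pvStrip (pvFirst line)) none rest
    else
      match copt with
      | none => pvRefA pools name (some line) rest
      | some cols => pvRefA (pvRowStep name cols pools line) name copt rest

-- B's two passes fused: pools of already-closed segments, current name, current body, remaining rows
def pvRefB : PySem.Dict String (PySem.Dict String String) → String → List (List String) →
    List (List String) → PySem.Dict String (PySem.Dict String String)
  | pools, name, body, [] => pvSegStep pools (name, body)
  | pools, name, body, line :: rest =>
    if pvIsHeader (pvFirst line) then pvRefB (pvSegStep pools (name, body)) (pvStrip (pvFirst line)) [] rest
    else pvRefB pools name (body ++ [line]) rest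

-- A's index loop over range(len(cols)) builds exactly dict(zip(cols, line)) when the row is long enough
lemma pv_range_zip (cols row : List String) (h : cols.length ≤ row.length) :
    ∀ (n j : Nat) (p : PySem.Dict String String), cols.length - j = n →
      (PySem.List.pyRange (j : Int) (cols.length : Int) 1).foldl
        (fun p i => p.insert (PySem.List.pyGetD cols i "") (PySem.List.pyGetD row i "")) p
      = ((cols.drop j).zip (row.drop j)).foldl (fun p kv => p.insert kv.1 kv.2) p := by
  intro n
  induction n with
  | zero =>
    intro j p hj
    have hle : cols.length ≤ j := by omega
    rw [PySem.List.pyRange_one_eq_nil (by exact_mod_cast hle)]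
    rw [List.drop_eq_nil_of_le hle]
    simp
  | succ n ih =>
    intro j p hj
    have hjlt : j < cols.length := by omega
    have hjlt' : j < row.length := by omega
    rw [PySem.List.pyRange_one_cons (by exact_mod_cast hjlt)]
    rw [List.drop_eq_getElem_cons hjlt, List.drop_eq_getElem_cons hjlt']
    simp only [List.foldl_cons, List.zip_cons_cons]
    have hc : PySem.List.pyGetD cols (j : Int) "" = cols[j] := by
      rw [PySem.List.pyGetD_natCast]; exact List.getD_eq_getElem _ _ hjlt
    have hl : PySem.List.pyGetD row (j : Int) "" = row[j] := by
      rw [PySem.List.pyGetD_natCast]; exact List.getD_eq_getElem _ _ hjlt'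
    rw [hc, hl]
    have := ih (j + 1) (p.insert cols[j] row[j]) (by omega)
    simpa using this

-- A's fold equals the reference recursion, given the precondition and a state in A's reachable shape
lemma pvA_ref : ∀ (lines : List (List String)) (pools : PySem.Dict String (PySem.Dict String String))
    (name : String) (cnt : Int) (cols : List String) (copt : Option (List String)),
    (copt = none → cnt = 0) → (∀ cs, copt = some cs → 1 ≤ cnt ∧ cols = cs) →
    pvPreAux copt lines = true →
    (lines.foldl pvStepA (pools, name, cnt, cols)).1 = pvRefA pools name copt lines := by
  intro lines
  induction lines with
  | nil => intro pools name cnt cols copt _ _ _; rfl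
  | cons line rest ih =>
    intro pools name cnt cols copt h0 h1 hpre
    cases line with
    | nil => simp [pvPreAux] at hpre
    | cons first tail =>
      have hfirst : pvFirst (first :: tail) = first := by simp [pvFirst, pysem]
      by_cases hh : pvIsHeader first = true
      · have hpre' : pvPreAux none rest = true := by simpa [pvPreAux, hh] using hpre
        simp only [List.foldl_cons, pvStepA, hfirst, hh, if_true, pvRefA]
        exact ih pools (pvStrip first) 0 cols none (fun _ => rfl) (by simp) hpre'
      · cases copt with
        | none =>
          have hc0 : cnt = 0 := h0 rfl
          have hpre' : pvPreAux (some (first :: tail)) rest = true := by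
            simpa [pvPreAux, hh] using hpre
          simp only [List.foldl_cons, pvStepA, hfirst, hh, Bool.false_eq_true, if_false, hc0,
            zero_add, if_true, pvRefA]
          exact ih pools name 1 (first :: tail) (some (first :: tail))
            (by simp) (fun cs hcs => ⟨le_refl 1, Option.some.inj hcs⟩) hpre'
        | some cs =>
          obtain ⟨hcnt, hcs⟩ := h1 cs rfl
          subst hcs
          have hne : ¬ (cnt + 1 = 1) := by omega
          have hlen : cols.length ≤ (first :: tail).length := by
            simp only [pvPreAux, hh, Bool.false_eq_true, if_false, Bool.and_eq_true,
              decide_eq_true_eq] at hpre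
            exact hpre.1.1.1
          have hpre' : pvPreAux (some cols) rest = true := by
            simp only [pvPreAux, hh, Bool.false_eq_true, if_false, Bool.and_eq_true] at hpre
            exact hpre.2
          have hpool :
              (PySem.List.pyRange 0 (cols.length : Int) 1).foldl
                (fun p i => p.insert (PySem.List.pyGetD cols i "") (PySem.List.pyGetD (first :: tail) i ""))
                PySem.Dict.empty
              = PySem.Dict.ofList (cols.zip (first :: tail)) := by
            have := pv_range_zip cols (first :: tail) hlen cols.length 0 PySem.Dict.empty (by omega)
            simpa using this
          simp only [List.foldl_cons, pvStepA, hfirst, hh, Bool.false_eq_true, if_false, hne,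
            hpool, pvRefA]
          exact ih _ name (cnt + 1) cols (some cols) (by simp) (fun cs hcs => ⟨by omega, Option.some.inj hcs⟩) hpre'

-- B's pass-1 fold followed by pass-2 fold equals the fused recursion pvRefB
lemma pvB_fold : ∀ (lines : List (List String)) (segs : List (String × List (List String)))
    (name : String) (body : List (List String)) (d : PySem.Dict String (PySem.Dict String String)),
    (((lines.foldl pvSeg1 (segs, name, body)).1
        ++ [((lines.foldl pvSeg1 (segs, name, body)).2.1, (lines.foldl pvSeg1 (segs, name, body)).2.2)]).foldl
        pvSegStep d)
    = pvRefB (segs.foldl pvSegStep d) name body lines := by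
  intro lines
  induction lines with
  | nil =>
    intro segs name body d
    simp [pvRefB, List.foldl_append]
  | cons line rest ih =>
    intro segs name body d
    by_cases hh : pvIsHeader (pvFirst line) = true
    · simp only [List.foldl_cons, pvSeg1, hh, if_true, pvRefB]
      rw [ih (segs ++ [(name, body)]) (pvStrip (pvFirst line)) [] d]
      rw [List.foldl_append]
      rfl
    · simp only [List.foldl_cons, pvSeg1, hh, Bool.false_eq_true, if_false, pvRefB]
      exact ih segs name (body ++ [line]) d

-- the fused B recursion equals the reference recursion
lemma pvB_refA : ∀ (lines : List (List String)) (name : String) (body : List (List String))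
    (pools : PySem.Dict String (PySem.Dict String String)),
    pvRefB pools name body lines = pvRefA (pvSegStep pools (name, body)) name body.head? lines := by
  intro lines
  induction lines with
  | nil => intro name body pools; rfl
  | cons line rest ih =>
    intro name body pools
    by_cases hh : pvIsHeader (pvFirst line) = true
    · simp only [pvRefB, hh, if_true, pvRefA]
      rw [ih (pvStrip (pvFirst line)) [] (pvSegStep pools (name, body))]
      rfl
    · simp only [pvRefB, hh, Bool.false_eq_true, if_false, pvRefA]
      rw [ih name (body ++ [line]) pools]
      cases body with
      | nil => rfl
      | cons cols rows =>
        simp only [List.cons_append, List.head?_cons, pvSegStep, List.foldl_append, List.foldl_cons,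
          List.foldl_nil]

-- ===== VERDICT (by name: the statement is the Claim_ definition above) =====
theorem parse_pgbouncer_pools_spec : Claim_equal_parse_pgbouncer_pools := by
  intro st _hdom hpre
  unfold Spec_parse_pgbouncer_pools
  simp only [parse_pgbouncer_pools, parse_pgbouncer_pools_alt]
  have hA := pvA_ref st PySem.Dict.empty "" 0 [] none (fun _ => rfl) (by simp) hpre
  have hB := pvB_fold st [] "" [] PySem.Dict.empty
  have hBA := pvB_refA st "" [] PySem.Dict.empty
  simp only [List.foldl_nil] at hB
  rw [hA, hB, hBA]
  rfl
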